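-- pv_equiv track=rewrite | github.com/bharathravi-in/ai-assistant-tutor | backend/app/services/pdf_service.py | _get_section_order
-- ===== SOURCE A (Python) =====
-- from typing import Optional, Dict, Any, List
--
-- def _get_section_order(content_type: str, structured_data: Dict) -> List[str]:
--     """Get the order of sections based on content type."""
--     # Check what mode the content was generated in
--     has_explain = any(k in structured_data for k in ['conceptual_briefing', 'simple_explanation', 'specific_examples'])
--     has_assist = any(k in structured_data for k in ['understanding', 'immediate_action', 'quick_activity'])
--     has_plan = any(k in structured_data for k in ['learning_objectives', 'activities', 'exit_questions'])
--
--     if has_plan: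
--         return [
--             'learning_objectives',
--             'duration_minutes',
--             'activities',
--             'multi_grade_adaptations',
--             'low_tlm_alternatives',
--             'exit_questions'
--         ]
--     elif has_assist:
--         return [
--             'understanding',
--             'immediate_action',
--             'mnemonics_hooks',
--             'quick_activity',
--             'bridge_the_gap',
--             'check_progress',
--             'for_later'
--         ]
--     else:  # explain mode or default
--         return [
--             'conceptual_briefing',
--             'simple_explanation',
--             'mnemonics_hooks',
--             'what_to_say',
--             'specific_examples',
--             'generic_examples',
--             'visual_aid_idea',
--             'check_for_understanding',
--             'common_misconceptions',
--             'oral_questions'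
--         ]
-- ===== SOURCE B (Python) =====
-- from typing import Dict, List
--
-- # priority of a key: 2 = plan marker, 1 = assist marker, 0 = anything else
-- _PRIORITY = {
--     'learning_objectives': 2, 'activities': 2, 'exit_questions': 2,
--     'understanding': 1, 'immediate_action': 1, 'quick_activity': 1,
-- }
--
-- def _get_section_order(content_type: str, structured_data: Dict) -> List[str]:
--     """Get the order of sections based on content type."""
--     best = 0
--     for key in structured_data:
--         best = max(best, _PRIORITY.get(key, 0))
--     if best == 2:
--         return [
--             'learning_objectives', 'duration_minutes', 'activities',
--             'multi_grade_adaptations', 'low_tlm_alternatives', 'exit_questions'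
--         ]
--     if best == 1:
--         return [
--             'understanding', 'immediate_action', 'mnemonics_hooks', 'quick_activity',
--             'bridge_the_gap', 'check_progress', 'for_later'
--         ]
--     return [
--         'conceptual_briefing', 'simple_explanation', 'mnemonics_hooks',
--         'what_to_say', 'specific_examples', 'generic_examples', 'visual_aid_idea',
--         'check_for_understanding', 'common_misconceptions', 'oral_questions'
--     ]
-- ===== Notes on version B (the rewrite author's own statement) =====
-- stated objective: alternative
-- what changed: Instead of testing each marker list for membership in the dict, B makes one pass over the dict's keys, folding the maximum priority (plan=2, assist=1, other=0) assigned to any key by a marker->priority map, and indexes the section order by that maximum.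
import Mathlib
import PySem

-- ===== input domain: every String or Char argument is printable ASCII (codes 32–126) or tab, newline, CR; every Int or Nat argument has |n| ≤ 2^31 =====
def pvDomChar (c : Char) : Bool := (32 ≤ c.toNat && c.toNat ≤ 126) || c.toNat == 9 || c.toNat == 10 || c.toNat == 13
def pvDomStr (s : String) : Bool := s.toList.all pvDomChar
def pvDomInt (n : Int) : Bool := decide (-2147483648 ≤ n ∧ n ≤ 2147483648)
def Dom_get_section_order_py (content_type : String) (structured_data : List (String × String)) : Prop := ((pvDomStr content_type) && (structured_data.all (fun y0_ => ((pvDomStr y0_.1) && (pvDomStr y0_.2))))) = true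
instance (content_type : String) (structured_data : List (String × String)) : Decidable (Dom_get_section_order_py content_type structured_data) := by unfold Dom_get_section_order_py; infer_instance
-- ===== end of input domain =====

-- B replaces A's three membership scans of marker lists by a single fold over the dict's keys
-- taking the maximum priority (plan=2, assist=1, other=0) from a marker->priority map (return value only).

-- `k in structured_data` on the dict: key membership in the association list
def pvHasKey (d : List (String × String)) (k : String) : Bool := d.any (fun p => p.1 == k)

-- ===== PORT A =====
def get_section_order_py (content_type : String) (structured_data : List (String × String)) : List String :=
  let _has_explain := ["conceptual_briefing", "simple_explanation", "specific_examples"].any (fun k => pvHasKey structured_data k)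
  let has_assist := ["understanding", "immediate_action", "quick_activity"].any (fun k => pvHasKey structured_data k)
  let has_plan := ["learning_objectives", "activities", "exit_questions"].any (fun k => pvHasKey structured_data k)
  if has_plan then
    ["learning_objectives", "duration_minutes", "activities",
     "multi_grade_adaptations", "low_tlm_alternatives", "exit_questions"]
  else if has_assist then
    ["understanding", "immediate_action", "mnemonics_hooks", "quick_activity",
     "bridge_the_gap", "check_progress", "for_later"]
  else
    ["conceptual_briefing", "simple_explanation", "mnemonics_hooks",
     "what_to_say", "specific_examples", "generic_examples", "visual_aid_idea",
     "check_for_understanding", "common_misconceptions", "oral_questions"]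

-- ===== PORT B =====
def pvPriority : PySem.Dict String Int :=
  PySem.Dict.ofList
    [("learning_objectives", 2), ("activities", 2), ("exit_questions", 2),
     ("understanding", 1), ("immediate_action", 1), ("quick_activity", 1)]

def get_section_order_py_alt (content_type : String) (structured_data : List (String × String)) : List String :=
  let best : Int := structured_data.foldl (fun best p => max best (pvPriority.getD p.1 0)) 0
  if best == 2 then
    ["learning_objectives", "duration_minutes", "activities",
     "multi_grade_adaptations", "low_tlm_alternatives", "exit_questions"]
  else if best == 1 then
    ["understanding", "immediate_action", "mnemonics_hooks", "quick_activity",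
     "bridge_the_gap", "check_progress", "for_later"]
  else
    ["conceptual_briefing", "simple_explanation", "mnemonics_hooks",
     "what_to_say", "specific_examples", "generic_examples", "visual_aid_idea",
     "check_for_understanding", "common_misconceptions", "oral_questions"]

-- ===== PRECONDITION & SPEC =====
def Spec_get_section_order_py (content_type : String) (structured_data : List (String × String)) (out : List String) : Prop := out = get_section_order_py_alt content_type structured_data
instance (content_type : String) (structured_data : List (String × String)) (out : List String) : Decidable (Spec_get_section_order_py content_type structured_data out) := by unfold Spec_get_section_order_py; infer_instance

-- ===== CLAIM =====
def Claim_equal_get_section_order_py : Prop := ∀ (content_type : String) (structured_data : List (String × String)), Dom_get_section_order_py content_type structured_data → Spec_get_section_order_py content_type structured_data (get_section_order_py content_type structured_data)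

-- ===== LEMMAS AND PROOFS =====

-- priority of one key, unfolded to the string tests A performs
lemma pvPriority_getD (k : String) :
    pvPriority.getD k 0 =
      if k == "learning_objectives" || k == "activities" || k == "exit_questions" then 2
      else if k == "understanding" || k == "immediate_action" || k == "quick_activity" then 1
      else 0 := by
  by_cases h1 : k = "learning_objectives"
  · subst h1; decide
  by_cases h2 : k = "activities"
  · subst h2; decide
  by_cases h3 : k = "exit_questions"
  · subst h3; decide
  by_cases h4 : k = "understanding"
  · subst h4; decide
  by_cases h5 : k = "immediate_action"
  · subst h5; decide
  by_cases h6 : k = "quick_activity"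
  · subst h6; decide
  have e : pvPriority = PySem.Dict.mk [("learning_objectives", 2), ("activities", 2), ("exit_questions", 2),
     ("understanding", 1), ("immediate_action", 1), ("quick_activity", 1)] := by decide
  rw [e]
  simp only [PySem.Dict.getD, PySem.Dict.get?]
  simp [h1, h2, h3, h4, h5, h6, Ne.symm h1, Ne.symm h2, Ne.symm h3, Ne.symm h4, Ne.symm h5, Ne.symm h6]

lemma pvPriority_bounds (p : String × String) : 0 ≤ pvPriority.getD p.1 0 ∧ pvPriority.getD p.1 0 ≤ 2 := by
  rw [pvPriority_getD]; split_ifs <;> omega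

-- pulling the accumulator out of the max-fold
lemma pv_foldl_shift (t : List (String × String)) : ∀ acc : Int, 0 ≤ acc →
    t.foldl (fun best p => max best (pvPriority.getD p.1 0)) acc =
      max acc (t.foldl (fun best p => max best (pvPriority.getD p.1 0)) 0) := by
  induction t with
  | nil => intro acc h; simp; omega
  | cons p t ih =>
    intro acc h
    have hp := pvPriority_bounds p
    simp only [List.foldl_cons]
    rw [ih (max acc (pvPriority.getD p.1 0)) (by omega),
        ih (max 0 (pvPriority.getD p.1 0)) (by omega)]
    omega

-- the fold computes: 2 if a plan key occurs, else 1 if an assist key occurs, else 0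
lemma pv_best_eq (sd : List (String × String)) :
    sd.foldl (fun best p => max best (pvPriority.getD p.1 0)) 0 =
      if sd.any (fun p => p.1 == "learning_objectives" || p.1 == "activities" || p.1 == "exit_questions") then 2
      else if sd.any (fun p => p.1 == "understanding" || p.1 == "immediate_action" || p.1 == "quick_activity") then 1
      else 0 := by
  induction sd with
  | nil => simp
  | cons p t ih =>
    have hp := pvPriority_bounds p
    have h0 := pvPriority_getD p.1
    simp only [List.foldl_cons, List.any_cons]
    rw [pv_foldl_shift t _ (by omega), ih]
    rcases Bool.eq_false_or_eq_true (p.1 == "learning_objectives" || p.1 == "activities" || p.1 == "exit_questions") with hc2 | hc2 <;>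
      rcases Bool.eq_false_or_eq_true (p.1 == "understanding" || p.1 == "immediate_action" || p.1 == "quick_activity") with hc1 | hc1 <;>
      simp only [hc2, hc1, if_true] at h0 <;>
      simp only [hc2, hc1, Bool.false_or, Bool.true_or] <;>
      rw [h0] <;> split_ifs <;> simp_all

-- A's marker-list scan equals the corresponding key predicate over the dict
lemma pv_any_swap (sd : List (String × String)) (m1 m2 m3 : String) :
    ([m1, m2, m3].any (fun k => pvHasKey sd k)) =
      sd.any (fun p => p.1 == m1 || p.1 == m2 || p.1 == m3) := by
  induction sd with
  | nil => simp [pvHasKey]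
  | cons p t ih =>
    simp only [pvHasKey, List.any_cons] at *
    cases h1 : p.1 == m1 <;> cases h2 : p.1 == m2 <;> cases h3 : p.1 == m3 <;>
      simp_all

-- ===== VERDICT =====
theorem get_section_order_py_spec : Claim_equal_get_section_order_py := by
  intro ct sd _
  unfold Spec_get_section_order_py get_section_order_py get_section_order_py_alt
  simp only [pv_any_swap, pv_best_eq]
  cases hp : sd.any (fun p => p.1 == "learning_objectives" || p.1 == "activities" || p.1 == "exit_questions") <;>
    cases ha : sd.any (fun p => p.1 == "understanding" || p.1 == "immediate_action" || p.1 == "quick_activity") <;>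
    simp
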